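-- pv_equiv track=rewrite | github.com/mickuseligijus/bioinformatika_lab1 | lab1.py | get_dicodons_sequences
-- ===== SOURCE A (Python) =====
-- def get_dicodons_sequences(filtered_pairs, sequence_frame):
--     list = []
--     for p in filtered_pairs:
--         (a,b) = p
--         l = sequence_frame[a:b+1]
--         list.append(l)
--
--     dicodons_list_frame = []
--     m = 0
--     counter = 0
--     temp =""
--     for l in list:
--         for i in l:
--             temp += i
--             counter = counter + 1
--             if counter == 2:
--                 counter = 0
--                 dicodons_list_frame.append(temp)
--                 temp = ""
--
--     return dicodons_list_frame
-- ===== SOURCE B (Python) =====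
-- def get_dicodons_sequences(filtered_pairs, sequence_frame):
--     combined = "".join(sequence_frame[a:b + 1] for (a, b) in filtered_pairs)
--     return [combined[2 * i:2 * i + 2] for i in range(len(combined) // 2)]
-- ===== Notes on version B (the rewrite author's own statement) =====
-- stated objective: simpler
-- what changed: Replaces the intermediate slice list and the char-by-char counter/temp state machine with one joined string plus a fixed-stride slicing comprehension.
import Mathlib
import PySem

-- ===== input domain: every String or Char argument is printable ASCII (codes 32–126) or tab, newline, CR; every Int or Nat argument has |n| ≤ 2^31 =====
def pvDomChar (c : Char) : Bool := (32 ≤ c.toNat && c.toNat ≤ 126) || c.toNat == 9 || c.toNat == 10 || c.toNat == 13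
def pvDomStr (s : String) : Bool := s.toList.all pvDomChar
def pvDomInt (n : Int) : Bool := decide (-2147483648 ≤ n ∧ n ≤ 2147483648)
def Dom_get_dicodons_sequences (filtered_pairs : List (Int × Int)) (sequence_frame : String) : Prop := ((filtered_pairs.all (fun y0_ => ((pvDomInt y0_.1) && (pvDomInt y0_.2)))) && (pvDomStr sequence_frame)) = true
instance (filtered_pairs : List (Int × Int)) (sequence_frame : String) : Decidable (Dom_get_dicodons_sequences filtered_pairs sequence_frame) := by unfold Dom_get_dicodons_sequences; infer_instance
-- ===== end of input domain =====

-- B replaces A's slice list and counter/temp char state machine with one joined string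
-- and a fixed-stride slicing comprehension (objective: simpler).

-- ===== PORT A =====
-- inner loop body: temp += i; counter += 1; if counter == 2: reset and append temp
def pvStepA (st : List String × Int × List Char) (c : Char) : List String × Int × List Char :=
  let temp := st.2.2 ++ [c]
  let counter := st.2.1 + 1
  if counter == 2 then (st.1 ++ [String.ofList temp], 0, ([] : List Char))
  else (st.1, counter, temp)

def get_dicodons_sequences (filtered_pairs : List (Int × Int)) (sequence_frame : String) : List String :=
  -- first loop: list.append(sequence_frame[a:b+1])
  let lst : List (List Char) :=
    filtered_pairs.foldl
      (fun acc p => acc ++ [PySem.List.slice sequence_frame.toList (some p.1) (some (p.2 + 1))]) []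
  -- second loop: the counter/temp state machine over each slice's characters
  let st := lst.foldl (fun st l => l.foldl pvStepA st) ([], 0, ([] : List Char))
  st.1

-- ===== PORT B =====
def get_dicodons_sequences_alt (filtered_pairs : List (Int × Int)) (sequence_frame : String) : List String :=
  let combined : List Char :=
    (filtered_pairs.map
      (fun p => PySem.List.slice sequence_frame.toList (some p.1) (some (p.2 + 1)))).flatten
  (List.range (combined.length / 2)).map
    (fun (i : Nat) => String.ofList (PySem.List.slice combined (some (2 * (i : Int))) (some (2 * (i : Int) + 2))))

-- ===== PRECONDITION & SPEC =====
def Spec_get_dicodons_sequences (filtered_pairs : List (Int × Int)) (sequence_frame : String) (out : List String) : Prop := out = get_dicodons_sequences_alt filtered_pairs sequence_frame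
instance (filtered_pairs : List (Int × Int)) (sequence_frame : String) (out : List String) : Decidable (Spec_get_dicodons_sequences filtered_pairs sequence_frame out) := by unfold Spec_get_dicodons_sequences; infer_instance

-- ===== CLAIM (what is proved, stated in full; the proofs are below) =====
def Claim_equal_get_dicodons_sequences : Prop := ∀ (filtered_pairs : List (Int × Int)) (sequence_frame : String), Dom_get_dicodons_sequences filtered_pairs sequence_frame → Spec_get_dicodons_sequences filtered_pairs sequence_frame (get_dicodons_sequences filtered_pairs sequence_frame)

-- ===== LEMMAS AND PROOFS =====

-- reference chunking: consecutive 2-char pieces, trailing odd char dropped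
def pvChunk2 : List Char → List String
  | [] => []
  | [_] => []
  | a :: b :: rest => String.ofList [a, b] :: pvChunk2 rest

theorem pvFoldA_chunk (cs : List Char) (out : List String) :
    (cs.foldl pvStepA (out, 0, ([] : List Char))).1 = out ++ pvChunk2 cs := by
  induction cs using pvChunk2.induct generalizing out with
  | case3 a b rest ih =>
      have h2 : pvStepA (pvStepA (out, 0, ([] : List Char)) a) b
          = (out ++ [String.ofList [a, b]], 0, ([] : List Char)) := by
        simp [pvStepA]
      simp only [List.foldl_cons, h2, ih, pvChunk2]
      simp
  | case1 => simp [pvChunk2]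
  | case2 c => simp [pvStepA, pvChunk2]

theorem pvB_chunk (cs : List Char) :
    (List.range (cs.length / 2)).map
      (fun (i : Nat) => String.ofList (PySem.List.slice cs (some (2 * (i : Int))) (some (2 * (i : Int) + 2)))) = pvChunk2 cs := by
  induction cs using pvChunk2.induct with
  | case3 a b rest ih =>
      have hlen : (a :: b :: rest).length / 2 = rest.length / 2 + 1 := by
        simp [List.length_cons]; omega
      rw [hlen, List.range_succ_eq_map]
      simp only [List.map_cons, List.map_map, pvChunk2]
      congr 1
      · rw [← ih]
        apply List.map_congr_left
        intro i _
        have hL : PySem.List.slice (a :: b :: rest) (some ((2 * (i + 1) : Nat) : Int)) (some (((2 * (i + 1) : Nat) : Int) + (2 : Nat))) = (((a :: b :: rest).drop (2 * (i + 1))).take 2) := PySem.List.slice_natCast_add _ _ _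
        have hR : PySem.List.slice rest (some ((2 * i : Nat) : Int)) (some (((2 * i : Nat) : Int) + (2 : Nat))) = ((rest.drop (2 * i)).take 2) := PySem.List.slice_natCast_add _ _ _
        have hdrop : (a :: b :: rest).drop (2 * (i + 1)) = rest.drop (2 * i) := by
          have : 2 * (i + 1) = (2 * i) + 1 + 1 := by ring
          simp [this]
        simp only [Function.comp_apply]
        push_cast at hL hR ⊢
        ring_nf at hL hR ⊢
        rw [hL, hR, show 2 + i * 2 = i * 2 + 1 + 1 by ring]
        simp [List.drop_succ_cons]
  | case1 => simp [pvChunk2]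
  | case2 c => simp [pvChunk2]

-- ===== VERDICT (by name: the statement is the Claim_ definition above) =====
theorem get_dicodons_sequences_spec : Claim_equal_get_dicodons_sequences := by
  intro fp sf _
  unfold Spec_get_dicodons_sequences
  simp only [get_dicodons_sequences, get_dicodons_sequences_alt,
    PySem.List.foldl_append_singleton_eq_map, List.nil_append]
  rw [← List.foldl_flatten, pvFoldA_chunk, pvB_chunk]
  simp
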